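-- pv_equiv track=rewrite | github.com/erikwang/mypyproject | callhomecheck/common/util.py | parseCheckOption
-- ===== SOURCE A (Python) =====
-- def parseCheckOption(optionList, appName):
--     if appName:
--         appName += ':'
--     value = ''
--     for option in optionList.split():
--         if appName and option.startswith(appName):
--             value = option[len(appName):]
--             break
--         elif ':' not in option:
--             value = option
--     return value
-- ===== SOURCE B (Python) =====
-- def parseCheckOption(optionList, appName):
--     options = optionList.split()
--     if appName:
--         prefix = appName + ':'
--         for option in options:
--             if option.startswith(prefix):
--                 return option[len(prefix):]
--     value = ''
--     for option in options:
--         if ':' not in option: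
--             value = option
--     return value
-- ===== Notes on version B (the rewrite author's own statement) =====
-- stated objective: simpler
-- what changed: Fused single loop with break and an accumulated default is split into two independent passes: an early-return scan for the first prefix match, then a plain last-colonless-option scan for the default.
import Mathlib
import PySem

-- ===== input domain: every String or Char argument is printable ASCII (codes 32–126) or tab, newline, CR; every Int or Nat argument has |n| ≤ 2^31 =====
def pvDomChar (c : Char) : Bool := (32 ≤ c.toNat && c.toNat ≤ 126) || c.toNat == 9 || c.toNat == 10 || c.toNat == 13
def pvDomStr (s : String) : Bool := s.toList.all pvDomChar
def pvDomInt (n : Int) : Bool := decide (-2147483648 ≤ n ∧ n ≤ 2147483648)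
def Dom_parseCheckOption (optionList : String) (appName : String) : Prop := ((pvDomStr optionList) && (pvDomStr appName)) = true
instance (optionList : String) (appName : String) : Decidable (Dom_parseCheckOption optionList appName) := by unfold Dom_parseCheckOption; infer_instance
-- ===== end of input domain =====

-- B changes the decomposition only: A's fused loop (accumulate default, break on prefix match)
-- becomes two independent passes (find first prefix match, else last colonless option).

-- ===== PORT A =====
-- A's single loop: break on the first prefix match, else keep the last colonless option.
def pcoLoopA (app : String) : List String → String → String
  | [], value => value
  | o :: rest, value =>
    if app ≠ "" ∧ PySem.Str.startswith o app then
      PySem.Str.slice o (some (PySem.Str.len app : Int)) none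
    else if ¬ (PySem.Str.isIn ":" o = true) then
      pcoLoopA app rest o
    else
      pcoLoopA app rest value

def parseCheckOption (optionList : String) (appName : String) : String :=
  let app := if appName ≠ "" then appName ++ ":" else appName
  pcoLoopA app (PySem.Str.split₀ optionList) ""

-- ===== PORT B =====
-- first pass: first option starting with the prefix, returning its remainder
def pcoFindPrefix (pre : String) : List String → Option String
  | [] => none
  | o :: rest =>
    if PySem.Str.startswith o pre then
      some (PySem.Str.slice o (some (PySem.Str.len pre : Int)) none)
    else pcoFindPrefix pre rest

-- second pass: last option not containing ':'
def pcoLastColonless (opts : List String) : String :=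
  opts.foldl (fun value o => if ¬ (PySem.Str.isIn ":" o = true) then o else value) ""

def parseCheckOption_alt (optionList : String) (appName : String) : String :=
  let options := PySem.Str.split₀ optionList
  if appName ≠ "" then
    match pcoFindPrefix (appName ++ ":") options with
    | some v => v
    | none => pcoLastColonless options
  else pcoLastColonless options

-- ===== PRECONDITION & SPEC =====
def Spec_parseCheckOption (optionList : String) (appName : String) (out : String) : Prop := out = parseCheckOption_alt optionList appName
instance (optionList : String) (appName : String) (out : String) : Decidable (Spec_parseCheckOption optionList appName out) := by unfold Spec_parseCheckOption; infer_instance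

-- ===== CLAIM (what is proved, stated in full; the proofs are below) =====
def Claim_equal_parseCheckOption : Prop := ∀ (optionList : String) (appName : String), Dom_parseCheckOption optionList appName → Spec_parseCheckOption optionList appName (parseCheckOption optionList appName)

-- ===== LEMMAS AND PROOFS =====

-- second-pass fold started from an arbitrary accumulator
def pcoFoldFrom (opts : List String) (v : String) : String :=
  opts.foldl (fun value o => if ¬ (PySem.Str.isIn ":" o = true) then o else value) v

theorem pcoFoldFrom_cons (o : String) (rest : List String) (v : String) :
    pcoFoldFrom (o :: rest) v =
      pcoFoldFrom rest (if ¬ (PySem.Str.isIn ":" o = true) then o else v) := rfl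

theorem pcoLastColonless_eq (opts : List String) : pcoLastColonless opts = pcoFoldFrom opts "" := rfl

-- with an empty app string, A's loop is exactly the default fold
theorem pcoLoopA_empty (opts : List String) (v : String) :
    pcoLoopA "" opts v = pcoFoldFrom opts v := by
  induction opts generalizing v with
  | nil => rfl
  | cons o rest ih =>
    rw [pcoFoldFrom_cons]
    simp only [pcoLoopA, ne_eq, not_true_eq_false, false_and, if_false]
    split_ifs with h <;> simp [ih]

-- with a nonempty prefix, A's loop is "first match, else default fold"
theorem pcoLoopA_ne (pre : String) (hpre : pre ≠ "") (opts : List String) (v : String) :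
    pcoLoopA pre opts v =
      (match pcoFindPrefix pre opts with
       | some w => w
       | none => pcoFoldFrom opts v) := by
  induction opts generalizing v with
  | nil => rfl
  | cons o rest ih =>
    rw [pcoFoldFrom_cons]
    simp only [pcoLoopA, pcoFindPrefix, hpre, ne_eq, not_false_eq_true, true_and]
    split_ifs with h1 h2 <;> simp [ih]

theorem append_colon_ne (s : String) : s ++ ":" ≠ "" := by
  intro h
  have : (s ++ ":").toList = "".toList := by rw [h]
  simp at this

-- ===== VERDICT (by name: the statement is the Claim_ definition above) =====
theorem parseCheckOption_spec : Claim_equal_parseCheckOption := by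
  intro optionList appName _
  unfold Spec_parseCheckOption parseCheckOption parseCheckOption_alt
  by_cases h : appName = ""
  · simp [h, pcoLoopA_empty, pcoLastColonless_eq]
  · simp only [h, ne_eq, not_false_eq_true, if_true]
    rw [pcoLoopA_ne _ (append_colon_ne appName), pcoLastColonless_eq]
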